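-- pv_equiv track=rewrite | github.com/MarcosFP812/PEC1-Algoritmia | T3-DivideYVenceras/transponer/matriz.py | unir_cuadrantes
-- ===== SOURCE A (Python) =====
-- def unir_cuadrantes(submatrices):
--
--     longitud = int(len(submatrices[0])*2)
--
--     punto_medio = int(longitud/2)
--
--     matriz = iniciar_matrizN(longitud)
--
--     for i in range(0, longitud):
--         for j in range(0, longitud):
--             if i<punto_medio and j<punto_medio:
--                 matriz[i][j] = submatrices[0][i][j]
--             elif i<punto_medio and j>=punto_medio:
--                 matriz[i][j] = submatrices[1][i][j-punto_medio]
--             elif i>=punto_medio and j<punto_medio: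
--                 matriz[i][j] = submatrices[2][i-punto_medio][j]
--             elif i>=punto_medio and j>=punto_medio:
--                 matriz[i][j] = submatrices[3][i-punto_medio][j-punto_medio]
--
--     return matriz
--
-- def iniciar_matrizN(n:int) ->  list[list[int]]:
--     matriz = []
--     for i in range(0, n):
--         matriz.append([])
--         for j in range(0, n):
--             matriz[i].append(0)
--     return matriz
-- ===== SOURCE B (Python) =====
-- def unir_cuadrantes(submatrices):
--     half = len(submatrices[0])
--     top = [submatrices[0][i][:half] + submatrices[1][i][:half] for i in range(half)]
--     bottom = [submatrices[2][i][:half] + submatrices[3][i][:half] for i in range(half)]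
--     return top + bottom
-- ===== Notes on version B (the rewrite author's own statement) =====
-- stated objective: simpler
-- what changed: B assembles each output row by concatenating the two quadrant rows (two row-building passes over the halves) instead of zero-filling an n x n matrix and overwriting it cell-by-cell with a four-way branch per cell.
import Mathlib
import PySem

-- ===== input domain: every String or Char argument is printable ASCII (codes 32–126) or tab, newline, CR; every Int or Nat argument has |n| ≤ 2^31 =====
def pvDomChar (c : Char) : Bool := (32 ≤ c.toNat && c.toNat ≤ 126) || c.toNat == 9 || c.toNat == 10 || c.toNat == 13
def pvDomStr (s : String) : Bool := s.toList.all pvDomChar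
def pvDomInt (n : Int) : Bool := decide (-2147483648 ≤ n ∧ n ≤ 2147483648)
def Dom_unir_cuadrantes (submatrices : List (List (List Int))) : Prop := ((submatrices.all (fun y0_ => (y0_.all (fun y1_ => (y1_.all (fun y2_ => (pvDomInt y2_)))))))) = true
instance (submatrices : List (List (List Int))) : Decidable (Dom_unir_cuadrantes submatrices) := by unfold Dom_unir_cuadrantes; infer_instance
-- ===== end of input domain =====

-- B replaces A's zero-filled n×n prefill plus per-cell four-way branch by direct row assembly:
-- each output row is the concatenation of the two matching quadrant rows. Objective: simpler.

-- ===== PORT A =====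

-- pvCell: total stand-in for the raising read submatrices[k][i][j]; exact under Pre_ (all indices in range)

def pvCell (s : List (List (List Int))) (k i j : Int) : Int :=
  PySem.List.pyGetD (PySem.List.pyGetD (PySem.List.pyGetD s k []) i []) j 0

def iniciar_matrizN (n : Int) : List (List Int) :=
  (PySem.List.pyRange 0 n 1).foldl (fun matriz i =>
    (PySem.List.pyRange 0 n 1).foldl
      (fun m _j => PySem.List.pySetD m i (PySem.List.pyGetD m i [] ++ [(0 : Int)]))
      (matriz ++ [([] : List Int)])) []

def unir_cuadrantes (submatrices : List (List (List Int))) : List (List Int) :=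
  let longitud : Int := ((PySem.List.pyGetD submatrices 0 []).length : Int) * 2
  let punto_medio : Int := PySem.Int.floordiv longitud 2
  let matriz := iniciar_matrizN longitud
  (PySem.List.pyRange 0 longitud 1).foldl (fun matriz i =>
    (PySem.List.pyRange 0 longitud 1).foldl (fun matriz j =>
      if i < punto_medio ∧ j < punto_medio then
        PySem.List.pySetD matriz i
          (PySem.List.pySetD (PySem.List.pyGetD matriz i []) j (pvCell submatrices 0 i j))
      else if i < punto_medio ∧ punto_medio ≤ j then
        PySem.List.pySetD matriz i
          (PySem.List.pySetD (PySem.List.pyGetD matriz i []) j (pvCell submatrices 1 i (j - punto_medio)))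
      else if punto_medio ≤ i ∧ j < punto_medio then
        PySem.List.pySetD matriz i
          (PySem.List.pySetD (PySem.List.pyGetD matriz i []) j (pvCell submatrices 2 (i - punto_medio) j))
      else if punto_medio ≤ i ∧ punto_medio ≤ j then
        PySem.List.pySetD matriz i
          (PySem.List.pySetD (PySem.List.pyGetD matriz i []) j (pvCell submatrices 3 (i - punto_medio) (j - punto_medio)))
      else matriz) matriz) matriz

def unir_cuadrantes_alt (submatrices : List (List (List Int))) : List (List Int) :=
  let half : Int := ((PySem.List.pyGetD submatrices 0 []).length : Int)
  let top : List (List Int) :=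
    (PySem.List.pyRange 0 half 1).map (fun i =>
      PySem.List.slice (PySem.List.pyGetD (PySem.List.pyGetD submatrices 0 []) i []) none (some half)
      ++ PySem.List.slice (PySem.List.pyGetD (PySem.List.pyGetD submatrices 1 []) i []) none (some half))
  let bottom : List (List Int) :=
    (PySem.List.pyRange 0 half 1).map (fun i =>
      PySem.List.slice (PySem.List.pyGetD (PySem.List.pyGetD submatrices 2 []) i []) none (some half)
      ++ PySem.List.slice (PySem.List.pyGetD (PySem.List.pyGetD submatrices 3 []) i []) none (some half))
  top ++ bottom


-- ===== PRECONDITION & SPEC =====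
-- Pre_: exactly the inputs on which A returns (no IndexError): submatrices nonempty, and if the first
-- quadrant is nonempty then there are at least 4 quadrants, each with at least half rows, every
-- accessed row having at least half cells.
def Pre_unir_cuadrantes (submatrices : List (List (List Int))) : Prop :=
  submatrices ≠ [] ∧
  ((submatrices.getD 0 []).length = 0 ∨
    (4 ≤ submatrices.length ∧
      ∀ k < 4, (submatrices.getD 0 []).length ≤ (submatrices.getD k []).length ∧
        ∀ i < (submatrices.getD 0 []).length,
          (submatrices.getD 0 []).length ≤ ((submatrices.getD k []).getD i []).length))
instance (submatrices : List (List (List Int))) : Decidable (Pre_unir_cuadrantes submatrices) := by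
  unfold Pre_unir_cuadrantes; infer_instance

def pvWitness_unir_cuadrantes : List (List (List Int)) := [[[1]], [[2]], [[3]], [[4]]]

def Spec_unir_cuadrantes (submatrices : List (List (List Int))) (out : List (List Int)) : Prop :=
  out = unir_cuadrantes_alt submatrices
instance (submatrices : List (List (List Int))) (out : List (List Int)) : Decidable (Spec_unir_cuadrantes submatrices out) := by
  unfold Spec_unir_cuadrantes; infer_instance

-- ===== CLAIM (what is proved, stated in full; the proofs are below) =====
def Claim_equal_unir_cuadrantes : Prop := ∀ (submatrices : List (List (List Int))), Dom_unir_cuadrantes submatrices → Pre_unir_cuadrantes submatrices → Spec_unir_cuadrantes submatrices (unir_cuadrantes submatrices)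

-- ===== LEMMAS AND PROOFS =====

lemma pv_set_mid {α : Type} (xs : List α) (r : List α) (v : α) (hn : xs.length < r.length) :
    (xs ++ r.drop xs.length).set xs.length v = (xs ++ [v]) ++ r.drop (xs.length + 1) := by
  rw [List.set_append_right _ _ (le_refl _)]
  simp only [Nat.sub_self]
  rw [List.drop_eq_getElem_cons hn, List.set_cons_zero]
  simp

lemma pv_getD_mid {α : Type} (xs : List α) (r : List α) (d : α) (hn : xs.length < r.length) :
    (xs ++ r.drop xs.length).getD xs.length d = r.getD xs.length d := by
  simp [List.getD, List.getElem?_append_right (le_refl xs.length), List.getElem?_eq_getElem hn,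
    List.getElem?_drop]

lemma pv_app_zeros {β : Type} (js : List β) : ∀ (pre : List (List Int)) (r : List Int),
    js.foldl (fun m _ => m.set pre.length ((m.getD pre.length []) ++ [(0 : Int)])) (pre ++ [r])
      = pre ++ [r ++ List.replicate js.length (0 : Int)] := by
  induction js with
  | nil => intro pre r; simp
  | cons j js ih =>
    intro pre r
    have h1 : (pre ++ [r]).getD pre.length [] = r := by
      simp [List.getD]
    have h2 : (pre ++ [r]).set pre.length (r ++ [(0 : Int)]) = pre ++ [r ++ [(0:Int)]] := by
      rw [List.set_append_right _ _ (le_refl _)]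
      simp
    simp only [List.foldl_cons, h1, h2, ih]
    simp [List.replicate_succ]

lemma pv_iniciar_eq (m : Nat) :
    iniciar_matrizN (m : Int) = List.replicate m (List.replicate m (0 : Int)) := by
  unfold iniciar_matrizN
  rw [PySem.List.pyRange_one]
  simp only [sub_zero, Int.toNat_natCast, List.foldl_map, zero_add,
    PySem.List.pySetD_natCast, PySem.List.pyGetD_natCast]
  have main : ∀ k : Nat, k ≤ m →
      (List.range k).foldl (fun matriz i =>
        (List.range m).foldl
          (fun mm _j => mm.set i (mm.getD i [] ++ [(0:Int)]))
          (matriz ++ [([] : List Int)])) []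
        = List.replicate k (List.replicate m (0 : Int)) := by
    intro k
    induction k with
    | zero => intro _; simp
    | succ n ihk =>
      intro hk
      rw [List.range_succ, List.foldl_append, ihk (by omega)]
      simp only [List.foldl_cons, List.foldl_nil]
      have := pv_app_zeros (List.range m)
        (List.replicate n (List.replicate m (0:Int))) ([] : List Int)
      simp only [List.length_replicate, List.length_range] at this
      rw [this]
      simp [← List.replicate_succ']
  exact main m (le_refl m)

lemma pv_fill_row (g : Nat → Int) : ∀ (L : Nat) (r : List Int), L ≤ r.length →
    (List.range L).foldl (fun r j => r.set j (g j)) r = (List.range L).map g ++ r.drop L := by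
  intro L
  induction L with
  | zero => intro r _; simp
  | succ n ih =>
    intro r hr
    rw [List.range_succ, List.foldl_append, ih r (by omega), List.map_append]
    have h1 : ((List.range n).map g).length < r.length := by simp; omega
    have h2 := pv_set_mid ((List.range n).map g) r (g n) h1
    simp only [List.length_map, List.length_range] at h2
    simp only [List.foldl_cons, List.foldl_nil, h2]
    simp

lemma pv_inner_commute (v : Nat → Int) (i : Nat) : ∀ (js : List Nat) (m : List (List Int)), i < m.length →
    js.foldl (fun m j => m.set i ((m.getD i []).set j (v j))) m
      = m.set i (js.foldl (fun r j => r.set j (v j)) (m.getD i [])) := by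
  intro js
  induction js with
  | nil => intro m hm; simp [List.getD, List.getElem?_eq_getElem hm]
  | cons j js ih =>
    intro m hm
    simp only [List.foldl_cons]
    rw [ih _ (by simpa using hm)]
    have hg : ((m.set i ((m.getD i []).set j (v j))).getD i []) = (m.getD i []).set j (v j) := by
      simp [List.getD, List.getElem?_set_self', List.getElem?_eq_getElem hm]
    rw [hg, List.set_set]

lemma pv_fill_mat (step : List (List Int) → Nat → List (List Int)) (F : Nat → List Int → List Int)
    (hstep : ∀ (m : List (List Int)) (i : Nat), i < m.length → step m i = m.set i (F i (m.getD i []))) :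
    ∀ (L : Nat) (m : List (List Int)), L ≤ m.length →
    (List.range L).foldl step m = (List.range L).map (fun i => F i (m.getD i [])) ++ m.drop L := by
  intro L
  induction L with
  | zero => intro m _; simp
  | succ n ih =>
    intro m hm
    rw [List.range_succ, List.foldl_append, ih m (by omega)]
    simp only [List.foldl_cons, List.foldl_nil]
    set pre := (List.range n).map (fun i => F i (m.getD i [])) with hpre
    have hlenpre : pre.length = n := by simp [hpre]
    have hlen : n < (pre ++ m.drop n).length := by simp [hlenpre]; omega
    rw [hstep _ _ hlen]
    have hg : (pre ++ m.drop n).getD n [] = m.getD n [] := by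
      have := pv_getD_mid pre m ([] : List Int) (by omega)
      simpa [hlenpre] using this
    have hs := pv_set_mid pre m (F n (m.getD n [])) (by simp [hlenpre]; omega)
    rw [hg]
    rw [show (pre ++ m.drop n).set n (F n (m.getD n [])) = (pre ++ [F n (m.getD n [])]) ++ m.drop (n+1) from by simpa [hlenpre] using hs]
    simp [hpre]

lemma pv_take_eq_map_range (H : Nat) (r : List Int) (h : H ≤ r.length) :
    (List.range H).map (fun k => r.getD k 0) = r.take H := by
  apply List.ext_getElem
  · simp [h]
  · intro n h1 h2
    simp at h1 h2 ⊢
    rw [List.getElem?_eq_getElem (by omega : n < r.length)]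
    rfl

def pvV (s : List (List (List Int))) (H : Nat) (ki kj : Nat) : Int :=
  if (ki:Int) < (H:Int) ∧ (kj:Int) < (H:Int) then pvCell s 0 ki kj
  else if (ki:Int) < (H:Int) ∧ (H:Int) ≤ (kj:Int) then pvCell s 1 ki ((kj:Int) - (H:Int))
  else if (H:Int) ≤ (ki:Int) ∧ (kj:Int) < (H:Int) then pvCell s 2 ((ki:Int) - (H:Int)) kj
  else pvCell s 3 ((ki:Int) - (H:Int)) ((kj:Int) - (H:Int))

lemma pv_A_canon (s : List (List (List Int))) (H : Nat) (hH : H = (s.getD 0 []).length) :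
    unir_cuadrantes s
      = (List.range (2*H)).map (fun ki => (List.range (2*H)).map (fun kj => pvV s H ki kj)) := by
  simp only [unir_cuadrantes]
  have h1 : ((PySem.List.pyGetD s 0 []).length : Int) * 2 = ((2*H : Nat) : Int) := by
    rw [PySem.List.pyGetD_zero, hH]; push_cast; ring
  rw [h1]
  have h2 : PySem.Int.floordiv ((2*H : Nat) : Int) 2 = (H : Int) := by
    rw [PySem.Int.floordiv_eq_ediv_of_pos (by norm_num)]; omega
  rw [h2, PySem.List.pyRange_one, pv_iniciar_eq (2*H)]
  simp only [sub_zero, Int.toNat_natCast, List.foldl_map, zero_add,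
    PySem.List.pySetD_natCast, PySem.List.pyGetD_natCast]
  have hstep : ∀ (m : List (List Int)) (i : Nat), i < m.length →
      (fun (x : List (List Int)) (y : Nat) =>
        (List.range (2*H)).foldl
          (fun (x : List (List Int)) (y_1 : Nat) =>
            if (y:Int) < (H:Int) ∧ (y_1:Int) < (H:Int) then x.set y ((x.getD y []).set y_1 (pvCell s 0 y y_1))
            else if (y:Int) < (H:Int) ∧ (H:Int) ≤ (y_1:Int) then x.set y ((x.getD y []).set y_1 (pvCell s 1 (y:Int) ((y_1:Int) - (H:Int))))
            else if (H:Int) ≤ (y:Int) ∧ (y_1:Int) < (H:Int) then x.set y ((x.getD y []).set y_1 (pvCell s 2 ((y:Int) - (H:Int)) (y_1:Int)))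
            else if (H:Int) ≤ (y:Int) ∧ (H:Int) ≤ (y_1:Int) then x.set y ((x.getD y []).set y_1 (pvCell s 3 ((y:Int) - (H:Int)) ((y_1:Int) - (H:Int))))
            else x) x) m i
      = m.set i ((fun i row => (List.range (2*H)).foldl (fun r kj => r.set kj (pvV s H i kj)) row) i (m.getD i [])) := by
    intro m i hi
    have hfun : (fun (x : List (List Int)) (y_1 : Nat) =>
            if (i:Int) < (H:Int) ∧ (y_1:Int) < (H:Int) then x.set i ((x.getD i []).set y_1 (pvCell s 0 i y_1))
            else if (i:Int) < (H:Int) ∧ (H:Int) ≤ (y_1:Int) then x.set i ((x.getD i []).set y_1 (pvCell s 1 (i:Int) ((y_1:Int) - (H:Int))))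
            else if (H:Int) ≤ (i:Int) ∧ (y_1:Int) < (H:Int) then x.set i ((x.getD i []).set y_1 (pvCell s 2 ((i:Int) - (H:Int)) (y_1:Int)))
            else if (H:Int) ≤ (i:Int) ∧ (H:Int) ≤ (y_1:Int) then x.set i ((x.getD i []).set y_1 (pvCell s 3 ((i:Int) - (H:Int)) ((y_1:Int) - (H:Int))))
            else x)
        = (fun (x : List (List Int)) (y_1 : Nat) => x.set i ((x.getD i []).set y_1 (pvV s H i y_1))) := by
      funext x y1
      simp only [pvV]
      split_ifs <;> first | rfl | omega
    show (List.range (2*H)).foldl _ m = _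
    rw [hfun]
    exact pv_inner_commute (pvV s H i) i (List.range (2*H)) m hi
  rw [pv_fill_mat _ (fun i row => (List.range (2*H)).foldl (fun r kj => r.set kj (pvV s H i kj)) row) hstep (2*H) _ (by simp)]
  simp only [List.drop_replicate, Nat.sub_self, List.replicate_zero, List.append_nil]
  apply List.map_congr_left
  intro ki hki
  rw [List.mem_range] at hki
  have hrow : (List.replicate (2*H) (List.replicate (2*H) (0:Int))).getD ki [] = List.replicate (2*H) (0:Int) := by
    have hh : ki < (List.replicate (2*H) (List.replicate (2*H) (0:Int))).length := by simpa using hki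
    simp [List.getD, List.getElem?_eq_getElem hh]
  rw [hrow, pv_fill_row (pvV s H ki) (2*H) _ (by simp)]
  simp

lemma pv_B_canon (s : List (List (List Int))) (H : Nat) (hH : H = (s.getD 0 []).length) :
    unir_cuadrantes_alt s
      = (List.range H).map (fun i => ((s.getD 0 []).getD i []).take H ++ ((s.getD 1 []).getD i []).take H)
        ++ (List.range H).map (fun i => ((s.getD 2 []).getD i []).take H ++ ((s.getD 3 []).getD i []).take H) := by
  simp only [unir_cuadrantes_alt]
  have h1 : ((PySem.List.pyGetD s 0 []).length : Int) = ((H : Nat) : Int) := by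
    rw [PySem.List.pyGetD_zero, hH]
  rw [h1, PySem.List.pyRange_one]
  simp only [sub_zero, Int.toNat_natCast, List.map_map, Function.comp_def, zero_add,
    PySem.List.pyGetD_natCast, PySem.List.pyGetD_ofNat',
    PySem.List.slice_to_natCast]

lemma pv_main (s : List (List (List Int)))
    (hpre : s ≠ [] ∧ ((s.getD 0 []).length = 0 ∨
      (4 ≤ s.length ∧ ∀ k < 4, (s.getD 0 []).length ≤ (s.getD k []).length ∧
        ∀ i < (s.getD 0 []).length, (s.getD 0 []).length ≤ ((s.getD k []).getD i []).length))) :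
    unir_cuadrantes s = unir_cuadrantes_alt s := by
  obtain ⟨hne, hcase⟩ := hpre
  set H := (s.getD 0 []).length with hH
  rw [pv_A_canon s H hH, pv_B_canon s H hH]
  rcases hcase with h0 | ⟨hlen4, hall⟩
  · simp [h0]
  · have hbound : ∀ k, k < 4 → ∀ i, i < H → H ≤ ((s.getD k []).getD i []).length := by
      intro k hk i hi; exact (hall k hk).2 i hi
    rw [show 2*H = H + H by ring, List.range_add, List.map_append, List.map_map]
    congr 1
    · apply List.map_congr_left
      intro i hi
      rw [List.mem_range] at hi
      rw [List.map_append, List.map_map]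
      congr 1
      · rw [← pv_take_eq_map_range H _ (hbound 0 (by omega) i hi)]
        apply List.map_congr_left
        intro kj hkj
        rw [List.mem_range] at hkj
        simp only [pvV, pvCell]
        rw [if_pos (by constructor <;> exact_mod_cast by omega)]
        simp [PySem.List.pyGetD_zero, PySem.List.pyGetD_natCast]
      · rw [← pv_take_eq_map_range H _ (hbound 1 (by omega) i hi)]
        apply List.map_congr_left
        intro kj hkj
        rw [List.mem_range] at hkj
        simp only [pvV, pvCell, Function.comp_def]
        rw [if_neg (by push_cast; omega), if_pos (by constructor <;> (push_cast; omega))]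
        have : ((H + kj : Nat) : Int) - (H : Int) = (kj : Nat) := by push_cast; ring
        rw [this]
        simp [PySem.List.pyGetD_ofNat', PySem.List.pyGetD_natCast]
    · apply List.map_congr_left
      intro i hi
      rw [List.mem_range] at hi
      simp only [Function.comp_def]
      rw [List.map_append, List.map_map]
      have hcast : ((H + i : Nat) : Int) - (H : Int) = (i : Nat) := by push_cast; ring
      congr 1
      · rw [← pv_take_eq_map_range H _ (hbound 2 (by omega) i hi)]
        apply List.map_congr_left
        intro kj hkj
        rw [List.mem_range] at hkj
        simp only [pvV, pvCell]
        rw [if_neg (by push_cast; omega), if_neg (by push_cast; omega),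
          if_pos (by constructor <;> (push_cast; omega)), hcast]
        simp [PySem.List.pyGetD_ofNat', PySem.List.pyGetD_natCast]
      · rw [← pv_take_eq_map_range H _ (hbound 3 (by omega) i hi)]
        apply List.map_congr_left
        intro kj hkj
        rw [List.mem_range] at hkj
        simp only [pvV, pvCell, Function.comp_def]
        rw [if_neg (by push_cast; omega), if_neg (by push_cast; omega),
          if_neg (by push_cast; omega), hcast]
        have : ((H + kj : Nat) : Int) - (H : Int) = (kj : Nat) := by push_cast; ring
        rw [this]
        simp [PySem.List.pyGetD_ofNat', PySem.List.pyGetD_natCast]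

-- ===== VERDICT (by name: the statement is the Claim_ definition above) =====
theorem unir_cuadrantes_spec : Claim_equal_unir_cuadrantes := by
  intro s _ hpre
  unfold Pre_unir_cuadrantes at hpre
  unfold Spec_unir_cuadrantes
  exact pv_main s hpre
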